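-- pv_equiv track=rewrite | github.com/wyk18703232953/myResearch | codeComplex/data/filteredData/python/np/python_np_0105.py | build_inputs
-- ===== SOURCE A (Python) =====
-- def build_inputs(n):
--     length = max(1, n)
--     # sent: first half '+', second half '-'
--     sent = "".join("+" if i < length // 2 else "-" for i in range(length))
--     # received: pattern with some '?'
--     received_chars = []
--     for i in range(length):
--         if i % 3 == 0:
--             received_chars.append("?")
--         elif i % 3 == 1:
--             received_chars.append("+")
--         else:
--             received_chars.append("-")
--     received = "".join(received_chars)
--     return sent, received
-- ===== SOURCE B (Python) =====
-- def build_inputs(n):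
--     length = max(1, n)
--     sent = "+" * (length // 2) + "-" * (length - length // 2)
--     received = ("?+-" * ((length + 2) // 3))[:length]
--     return sent, received
-- ===== Notes on version B (the rewrite author's own statement) =====
-- stated objective: faster
-- what changed: Replaces the per-index loops with closed-form string construction: sent is '+'*(length//2) + '-'*(length-length//2) and received is the period-3 block '?+-' repeated ceil(length/3) times and sliced to length (bulk string operations, no per-character Python loop).
import Mathlib
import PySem

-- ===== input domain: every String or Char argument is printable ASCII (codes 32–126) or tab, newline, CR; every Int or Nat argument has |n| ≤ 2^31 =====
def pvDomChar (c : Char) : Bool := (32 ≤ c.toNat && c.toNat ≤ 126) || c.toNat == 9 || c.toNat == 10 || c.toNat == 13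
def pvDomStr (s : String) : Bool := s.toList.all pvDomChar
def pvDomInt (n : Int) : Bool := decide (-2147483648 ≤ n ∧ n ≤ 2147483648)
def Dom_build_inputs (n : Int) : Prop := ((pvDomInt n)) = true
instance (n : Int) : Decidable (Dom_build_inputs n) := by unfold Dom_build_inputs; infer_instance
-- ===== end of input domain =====

-- B builds both strings in closed form (replicate + period-3 block sliced) instead of A's per-index loops; objective: faster (measured: bulk string construction vs per-character loops).


-- ===== PORT A =====
-- "".join over range(length): one char per index, in index order
def build_inputs (n : Int) : String × String :=
  let length := max 1 n
  let sent := String.mk ((PySem.List.pyRange 0 length 1).map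
      (fun i => if i < PySem.Int.floordiv length 2 then '+' else '-'))
  let received_chars := (PySem.List.pyRange 0 length 1).foldl
      (fun acc i =>
        if PySem.Int.mod i 3 = 0 then acc ++ ['?']
        else if PySem.Int.mod i 3 = 1 then acc ++ ['+']
        else acc ++ ['-']) []
  let received := String.mk received_chars
  (sent, received)

-- ===== PORT B =====
def build_inputs_alt (n : Int) : String × String :=
  let length := max 1 n
  let sent := String.mk (List.replicate (PySem.Int.floordiv length 2).toNat '+'
      ++ List.replicate (length - PySem.Int.floordiv length 2).toNat '-')
  let received := String.mk (PySem.List.slice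
      (List.flatten (List.replicate (PySem.Int.floordiv (length + 2) 3).toNat ['?', '+', '-']))
      none (some length))
  (sent, received)

-- ===== PRECONDITION & SPEC =====
def Spec_build_inputs (n : Int) (out : String × String) : Prop := out = build_inputs_alt n
instance (n : Int) (out : String × String) : Decidable (Spec_build_inputs n out) := by unfold Spec_build_inputs; infer_instance

-- ===== CLAIM (what is proved, stated in full; the proofs are below) =====
def Claim_equal_build_inputs : Prop := ∀ (n : Int), Dom_build_inputs n → Spec_build_inputs n (build_inputs n)

-- ===== LEMMAS AND PROOFS =====

-- the per-index character of `received`, on the Nat side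
def pvRecChar (k : Nat) : Char := if k % 3 = 0 then '?' else if k % 3 = 1 then '+' else '-'

lemma pvFlattenReplicate (t : Nat) :
    List.flatten (List.replicate t ['?', '+', '-']) = (List.range (3 * t)).map pvRecChar := by
  induction t with
  | zero => simp
  | succ t ih =>
      rw [List.replicate_succ', List.flatten_append, ih]
      have h3 : 3 * (t + 1) = 3 * t + 1 + 1 + 1 := by omega
      rw [h3, List.range_succ, List.range_succ, List.range_succ]
      simp only [List.map_append, List.map_cons, List.map_nil, List.append_assoc]
      have e1 : (3 * t) % 3 = 0 := by omega
      have e2 : (3 * t + 1) % 3 = 1 := by omega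
      have e3 : (3 * t + 1 + 1) % 3 = 2 := by omega
      simp [pvRecChar, e1, e2, e3]

lemma pvSentChars (m : Nat) :
    (List.range m).map (fun k => if k < m / 2 then '+' else '-')
      = List.replicate (m / 2) '+' ++ List.replicate (m - m / 2) '-' := by
  apply List.ext_getElem
  · simp; omega
  · intro i h1 h2
    have hi : i < m := by simpa using h1
    by_cases hc : i < m / 2
    · rw [List.getElem_append_left (by simpa using hc)]
      simp [hc]
    · rw [List.getElem_append_right (by simpa using hc)]
      simp [hc]

theorem build_inputs_spec : Claim_equal_build_inputs := by
  intro n _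
  unfold Spec_build_inputs build_inputs build_inputs_alt
  set L : Int := max 1 n with hL
  have hL1 : 1 ≤ L := le_max_left 1 n
  obtain ⟨m, hm⟩ : ∃ m : Nat, L = (m : Int) := ⟨L.toNat, (Int.toNat_of_nonneg (by omega)).symm⟩
  simp only
  rw [Prod.mk.injEq]
  constructor
  · -- sent
    congr 1
    rw [PySem.List.pyRange_one]
    have hdiv : PySem.Int.floordiv L 2 = ((m / 2 : Nat) : Int) := by
      rw [hm]; exact_mod_cast PySem.Int.floordiv_natCast m 2
    rw [hdiv]
    have hsub : (L - ((m / 2 : Nat) : Int)).toNat = m - m / 2 := by omega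
    rw [hsub]
    have hlen : (L - 0).toNat = m := by omega
    rw [hlen, List.map_map]
    have hmap : ((fun i => if i < ((m / 2 : Nat) : Int) then '+' else '-') ∘ fun k : Nat => (0 : Int) + k)
        = fun k : Nat => if k < m / 2 then '+' else '-' := by
      funext k
      simp only [Function.comp, zero_add]
      by_cases hc : k < m / 2 <;> simp [hc] <;> omega
    rw [hmap, pvSentChars]
    simp
    omega
  · -- received
    congr 1
    -- A side: the foldl appends one char per index
    have hfold : ∀ (xs : List Int) (acc : List Char),
        xs.foldl (fun acc i =>
          if PySem.Int.mod i 3 = 0 then acc ++ ['?']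
          else if PySem.Int.mod i 3 = 1 then acc ++ ['+']
          else acc ++ ['-']) acc
        = acc ++ xs.map (fun i =>
            if PySem.Int.mod i 3 = 0 then '?'
            else if PySem.Int.mod i 3 = 1 then '+' else '-') := by
      intro xs
      induction xs with
      | nil => simp
      | cons x xs ih =>
          intro acc
          simp only [List.foldl_cons, List.map_cons]
          split_ifs with h1 h2 <;> rw [ih] <;> simp_all
    rw [hfold, List.nil_append, PySem.List.pyRange_one]
    have hlen : (L - 0).toNat = m := by omega
    rw [hlen, List.map_map]
    have hmap : ((fun i => if PySem.Int.mod i 3 = 0 then '?'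
            else if PySem.Int.mod i 3 = 1 then '+' else '-') ∘ fun k : Nat => (0 : Int) + k)
        = pvRecChar := by
      funext k
      simp only [Function.comp, zero_add, pvRecChar]
      have h1 : PySem.Int.mod (k : Int) 3 = ((k % 3 : Nat) : Int) := PySem.Int.mod_natCast k 3
      rw [h1]
      rcases (show k % 3 = 0 ∨ k % 3 = 1 ∨ k % 3 = 2 by omega) with h | h | h <;> simp [h]
    rw [hmap]
    -- B side
    have hceil : PySem.Int.floordiv (L + 2) 3 = (((m + 2) / 3 : Nat) : Int) := by
      rw [hm]
      have : ((m : Int) + 2) = ((m + 2 : Nat) : Int) := by push_cast; ring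
      rw [this]
      exact_mod_cast PySem.Int.floordiv_natCast (m + 2) 3
    rw [hceil]
    have ht : (((( m + 2) / 3 : Nat) : Int)).toNat = (m + 2) / 3 := by omega
    rw [ht, pvFlattenReplicate]
    rw [PySem.List.slice_to _ (by omega)]
    have hLt : L.toNat = m := by omega
    rw [hLt, ← List.map_take, List.take_range]
    have : min m (3 * ((m + 2) / 3)) = m := by omega
    rw [this]

-- ===== VERDICT (by name: the statement is the Claim_ definition above) =====
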